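-- pv_equiv track=rewrite | github.com/rimon107/codility | toptal/task2/sol.py | solution
-- ===== SOURCE A (Python) =====
-- def solution(P, S):
--
--     total_people = sum(P)
--     total_seats = sum(S)
--     total_avail = total_seats - total_people
--     cars = S.copy()
--     cars.sort()
--     S.sort()
--
--     for seats in S:
--         if seats <= total_avail:
--             total_avail -= seats
--             cars.pop(0)
--         else:
--             break
--     return len(cars)
-- ===== SOURCE B (Python) =====
-- def solution(P, S):
--     avail = sum(S) - sum(P)
--     seats = sorted(S)
--     prefix = 0
--     for k, s in enumerate(seats):
--         prefix += s
--         if prefix > avail: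
--             return len(seats) - k
--     return 0
-- ===== Notes on version B (the rewrite author's own statement) =====
-- stated objective: faster
-- what changed: Replaces the mutable cars copy with repeated pop(0) by a single pass over the sorted list keeping a running prefix sum and an index counter, returning len-k at the first seat count that no longer fits.
import Mathlib
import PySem

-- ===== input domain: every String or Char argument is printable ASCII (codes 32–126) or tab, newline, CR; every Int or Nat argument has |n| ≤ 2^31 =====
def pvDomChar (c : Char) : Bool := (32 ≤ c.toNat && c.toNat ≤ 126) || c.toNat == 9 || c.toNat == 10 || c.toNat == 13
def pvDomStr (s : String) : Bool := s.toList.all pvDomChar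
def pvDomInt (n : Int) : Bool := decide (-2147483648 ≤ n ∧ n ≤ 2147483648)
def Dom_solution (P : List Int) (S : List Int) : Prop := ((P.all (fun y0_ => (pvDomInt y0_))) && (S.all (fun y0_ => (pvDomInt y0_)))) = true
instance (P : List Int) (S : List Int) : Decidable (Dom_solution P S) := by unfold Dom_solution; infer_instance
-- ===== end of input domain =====

-- B replaces A's pop(0)-mutating loop by one indexed pass with a running pfx sum
-- (faster; return value only: A sorts its argument S in place, B does not mutate).
-- ===== PORT A =====
-- A's for-loop over sorted S: state is (total_avail, cars); pop(0) is cars.tail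
-- (cars is always nonempty when popped in A's executions, so this is exact there).
def solLoopA : List Int → Int → List Int → List Int
  | [], _, cars => cars
  | seats :: rest, avail, cars =>
    if seats ≤ avail then solLoopA rest (avail - seats) cars.tail
    else cars

def solution (P : List Int) (S : List Int) : Int :=
  let total_people := P.foldl (· + ·) 0
  let total_seats := S.foldl (· + ·) 0
  let total_avail := total_seats - total_people
  let sortedS := PySem.List.sorted S (fun x => x) false
  ((solLoopA sortedS total_avail sortedS).length : Int)

-- ===== PORT B =====
-- B's enumerate loop: state is (pfx, k); early return (len seats - k).
def solLoopB : List Int → Int → Int → Int → Int → Int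
  | [], _, _, _, _ => 0
  | s :: rest, avail, pfx, k, n =>
    if pfx + s > avail then n - k
    else solLoopB rest avail (pfx + s) (k + 1) n

def solution_alt (P : List Int) (S : List Int) : Int :=
  let avail := S.foldl (· + ·) 0 - P.foldl (· + ·) 0
  let seats := PySem.List.sorted S (fun x => x) false
  solLoopB seats avail 0 0 (seats.length : Int)

-- ===== PRECONDITION & SPEC =====
def Spec_solution (P : List Int) (S : List Int) (out : Int) : Prop := out = solution_alt P S
instance (P : List Int) (S : List Int) (out : Int) : Decidable (Spec_solution P S out) := by unfold Spec_solution; infer_instance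

-- ===== CLAIM (what is proved, stated in full; the proofs are below) =====
def Claim_equal_solution : Prop := ∀ (P : List Int) (S : List Int), Dom_solution P S → Spec_solution P S (solution P S)

-- ===== LEMMAS AND PROOFS =====

-- ===== VERDICT (by name: the statement is the Claim_ definition above) =====
-- Invariant: B's (avail, pfx) pair tracks A's decreasing avail (= avail - pfx),
-- and cars stays exactly as long as the remaining iteration list.
theorem loop_eq (l : List Int) : ∀ (avail pfx k : Int) (cars : List Int) (n : Int),
    cars.length = l.length → n = k + (l.length : Int) →
    ((solLoopA l (avail - pfx) cars).length : Int) = solLoopB l avail pfx k n := by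
  induction l with
  | nil =>
    intro avail pfx k cars n hlen hn
    simp [solLoopA, solLoopB, hlen]
  | cons s rest ih =>
    intro avail pfx k cars n hlen hn
    cases cars with
    | nil => simp at hlen
    | cons c cs =>
      simp only [List.length_cons] at hlen hn
      by_cases h : pfx + s > avail
      · have h' : ¬ (s ≤ avail - pfx) := by omega
        simp only [solLoopA, solLoopB, if_neg h', if_pos h]
        simp [hlen]
        omega
      · have h' : s ≤ avail - pfx := by omega
        simp only [solLoopA, solLoopB, if_pos h', if_neg h, List.tail_cons]
        have : avail - pfx - s = avail - (pfx + s) := by ring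
        rw [this]
        exact ih avail (pfx + s) (k + 1) cs n (by omega) (by omega)

theorem solution_spec : Claim_equal_solution := by
  intro P S _
  unfold Spec_solution solution solution_alt
  simp only []
  have := loop_eq (PySem.List.sorted S (fun x => x) false)
    (S.foldl (· + ·) 0 - P.foldl (· + ·) 0) 0 0
    (PySem.List.sorted S (fun x => x) false)
    ((PySem.List.sorted S (fun x => x) false).length : Int) rfl (by omega)
  simpa using this
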